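-- pv_equiv track=rewrite | github.com/shafayetfahim/CSC240_FinalProject | miner1.py | determine_passed
-- ===== SOURCE A (Python) =====
-- def determine_passed(actions):
--     """
--     Heuristic: check latest action text for passage language.
--     Returns 'Yes', 'No', or 'Unknown'.
--     """
--     passage_keywords = [
--         "became public law", "signed by president", "passed senate",
--         "passed house", "agreed to in senate", "agreed to in house",
--         "presented to president",
--     ]
--     veto_keywords = ["vetoed", "pocket vetoed"]
--     for action in reversed(actions):          # most-recent first
--         text = action.get("text", "").lower()
--         if any(k in text for k in passage_keywords):
--             return "Yes"
--         if any(k in text for k in veto_keywords):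
--             return "No"
--     return "Unknown"
-- ===== SOURCE B (Python) =====
-- def determine_passed(actions):
--     """
--     Heuristic: check latest action text for passage language.
--     Returns 'Yes', 'No', or 'Unknown'.
--     Staged approach: lower-case all texts once, find the last index with a
--     passage keyword and the last index with a veto keyword, then compare.
--     A tie (same action holds both) keeps passage priority via >=.
--     """
--     passage_keywords = [
--         "became public law", "signed by president", "passed senate",
--         "passed house", "agreed to in senate", "agreed to in house",
--         "presented to president",
--     ]
--     veto_keywords = ["vetoed", "pocket vetoed"]
--     texts = [a.get("text", "").lower() for a in actions]
--     idx_p = -1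
--     for i, t in enumerate(texts):
--         if any(k in t for k in passage_keywords):
--             idx_p = i
--     idx_v = -1
--     for i, t in enumerate(texts):
--         if any(k in t for k in veto_keywords):
--             idx_v = i
--     if idx_p < 0 and idx_v < 0:
--         return "Unknown"
--     return "Yes" if idx_p >= idx_v else "No"
-- ===== Notes on version B (the rewrite author's own statement) =====
-- stated objective: alternative
-- what changed: B lower-cases all texts in one map pass, computes the last index containing a passage keyword and the last index containing a veto keyword in two separate scans, and decides by comparing the two indices (>= gives passage priority on a tie), instead of A's reversed-order scan with early return.
import Mathlib
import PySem

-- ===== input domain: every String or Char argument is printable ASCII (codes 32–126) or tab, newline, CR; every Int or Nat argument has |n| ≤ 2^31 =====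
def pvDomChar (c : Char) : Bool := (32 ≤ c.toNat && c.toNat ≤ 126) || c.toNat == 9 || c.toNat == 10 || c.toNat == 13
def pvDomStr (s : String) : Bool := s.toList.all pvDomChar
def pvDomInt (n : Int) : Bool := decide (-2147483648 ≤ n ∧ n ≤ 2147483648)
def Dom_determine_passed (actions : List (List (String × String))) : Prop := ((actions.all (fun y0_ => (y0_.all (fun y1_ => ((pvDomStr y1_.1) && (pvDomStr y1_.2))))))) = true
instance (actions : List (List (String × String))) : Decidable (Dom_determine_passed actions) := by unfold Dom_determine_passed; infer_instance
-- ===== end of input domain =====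

-- B lower-cases all texts once, then finds the last passage index and the last veto index and compares them, instead of A's reversed early-return scan; same results.

def pvPassageKeywords : List String :=
  ["became public law", "signed by president", "passed senate",
   "passed house", "agreed to in senate", "agreed to in house",
   "presented to president"]

def pvVetoKeywords : List String := ["vetoed", "pocket vetoed"]

-- ===== PORT A =====
-- the 'for action in reversed(actions)' loop with early return, as structural recursion
def pvGoA : List (List (String × String)) → String
  | [] => "Unknown"
  | action :: rest =>
    let text := PySem.Str.lower ((PySem.Dict.mk action).getD "text" "")
    if pvPassageKeywords.any (fun k => PySem.Str.isIn k text) then "Yes"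
    else if pvVetoKeywords.any (fun k => PySem.Str.isIn k text) then "No"
    else pvGoA rest

def determine_passed (actions : List (List (String × String))) : String :=
  pvGoA actions.reverse

-- ===== PORT B =====
-- texts = [a.get("text","").lower() for a in actions]
def pvTexts (actions : List (List (String × String))) : List String :=
  actions.map (fun a => PySem.Str.lower ((PySem.Dict.mk a).getD "text" ""))

-- 'idx = -1; for i, t in enumerate(texts): if <hit>: idx = i'
def pvLastIdx (kws : List String) (texts : List String) : Int :=
  (PySem.List.enumerate texts).foldl
    (fun idx it => if kws.any (fun k => PySem.Str.isIn k it.2) then it.1 else idx) (-1)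

def determine_passed_alt (actions : List (List (String × String))) : String :=
  let texts := pvTexts actions
  let idxP := pvLastIdx pvPassageKeywords texts
  let idxV := pvLastIdx pvVetoKeywords texts
  if idxP < 0 && idxV < 0 then "Unknown"
  else if idxV ≤ idxP then "Yes" else "No"

-- ===== PRECONDITION & SPEC =====
def Spec_determine_passed (actions : List (List (String × String))) (out : String) : Prop := out = determine_passed_alt actions
instance (actions : List (List (String × String))) (out : String) : Decidable (Spec_determine_passed actions out) := by unfold Spec_determine_passed; infer_instance

-- ===== CLAIM =====
def Claim_equal_determine_passed : Prop := ∀ (actions : List (List (String × String))), Dom_determine_passed actions → Spec_determine_passed actions (determine_passed actions)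

-- ===== LEMMAS AND PROOFS =====

lemma pvLastIdx_append (kws : List String) (l : List String) (t : String) :
    pvLastIdx kws (l ++ [t]) =
      if kws.any (fun k => PySem.Str.isIn k t) then (l.length : Int) else pvLastIdx kws l := by
  simp [pvLastIdx, PySem.List.enumerate_append, PySem.List.enumerate_cons]

lemma pvLastIdx_lt (kws : List String) (l : List String) :
    pvLastIdx kws l < (l.length : Int) := by
  induction l using List.reverseRecOn with
  | nil => simp [pvLastIdx]
  | append_singleton l t ih =>
    rw [pvLastIdx_append]
    split
    · simp
    · simp only [List.length_append, List.length_cons, List.length_nil]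
      push_cast
      omega

lemma pvLastIdx_neg_one (kws : List String) : pvLastIdx kws [] = -1 := rfl

-- main bridge: A's reversed early-return scan equals B's index comparison
lemma pvGoA_reverse_eq (actions : List (List (String × String))) :
    pvGoA actions.reverse =
      (let texts := pvTexts actions
       let idxP := pvLastIdx pvPassageKeywords texts
       let idxV := pvLastIdx pvVetoKeywords texts
       if idxP < 0 && idxV < 0 then "Unknown"
       else if idxV ≤ idxP then "Yes" else "No") := by
  induction actions using List.reverseRecOn with
  | nil => simp [pvGoA, pvTexts, pvLastIdx_neg_one]
  | append_singleton l a ih =>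
    have htexts : pvTexts (l ++ [a]) =
        pvTexts l ++ [PySem.Str.lower ((PySem.Dict.mk a).getD "text" "")] := by
      simp [pvTexts]
    have hlen : ((pvTexts l).length : Int) = (l.length : Int) := by simp [pvTexts]
    have hPlt := pvLastIdx_lt pvPassageKeywords (pvTexts l)
    have hVlt := pvLastIdx_lt pvVetoKeywords (pvTexts l)
    rw [hlen] at hPlt hVlt
    have hlen0 : (0 : Int) ≤ (l.length : Int) := Int.natCast_nonneg _
    rw [List.reverse_append]
    simp only [List.reverse_singleton, List.singleton_append]
    rw [pvGoA]
    cases hp : pvPassageKeywords.any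
        (fun k => PySem.Str.isIn k (PySem.Str.lower ((PySem.Dict.mk a).getD "text" ""))) with
    | true =>
      have hP : pvLastIdx pvPassageKeywords (pvTexts (l ++ [a])) = (l.length : Int) := by
        rw [htexts, pvLastIdx_append, if_pos hp, hlen]
      have hVle : pvLastIdx pvVetoKeywords (pvTexts (l ++ [a])) ≤ (l.length : Int) := by
        rw [htexts, pvLastIdx_append]
        split
        · rw [hlen]
        · omega
      rw [if_pos rfl,
          if_neg (by simp only [Bool.and_eq_true, decide_eq_true_eq]; omega),
          if_pos (by omega)]
    | false =>
      have hP : pvLastIdx pvPassageKeywords (pvTexts (l ++ [a])) =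
          pvLastIdx pvPassageKeywords (pvTexts l) := by
        rw [htexts, pvLastIdx_append, if_neg (by rw [hp]; decide)]
      rw [if_neg (by decide)]
      cases hv : pvVetoKeywords.any
          (fun k => PySem.Str.isIn k (PySem.Str.lower ((PySem.Dict.mk a).getD "text" ""))) with
      | true =>
        have hV : pvLastIdx pvVetoKeywords (pvTexts (l ++ [a])) = (l.length : Int) := by
          rw [htexts, pvLastIdx_append, if_pos hv, hlen]
        rw [if_pos rfl,
            if_neg (by simp only [Bool.and_eq_true, decide_eq_true_eq]; omega),
            if_neg (by omega)]
      | false =>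
        have hV : pvLastIdx pvVetoKeywords (pvTexts (l ++ [a])) =
            pvLastIdx pvVetoKeywords (pvTexts l) := by
          rw [htexts, pvLastIdx_append, if_neg (by rw [hv]; decide)]
        rw [if_neg (by decide), hP, hV]
        exact ih

-- ===== VERDICT =====
theorem determine_passed_spec : Claim_equal_determine_passed := by
  intro actions _
  unfold Spec_determine_passed determine_passed determine_passed_alt
  exact pvGoA_reverse_eq actions
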